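-- pv_equiv track=rewrite | github.com/steveguang/Demograpics | emoji_hashtag_seg2.py | process_emojis
-- ===== SOURCE A (Python) =====
-- def process_emojis(emojis):
--     emojis_list = []
--     if not emojis:
--         return emojis_list
--     for tweet_emoji in emojis.split(" "):
--         emojis_words = tweet_emoji.lower().replace(":", "_").split("_")
--         for word in emojis_words:
--             if word:
--                 emojis_list.append(word)
--     return emojis_list
-- ===== SOURCE B (Python) =====
-- def process_emojis(emojis):
--     out = []
--     cur = []
--     for ch in emojis:
--         if ch in ' :_':
--             if cur:
--                 out.append(''.join(cur))
--                 cur = []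
--         else:
--             cur.append(ch.lower())
--     if cur:
--         out.append(''.join(cur))
--     return out
-- ===== Notes on version B (the rewrite author's own statement) =====
-- stated objective: alternative
-- what changed: Replaces the two nested split passes (split on space, lower+replace per token, split on underscore, filter empties) by a single character-level scan that accumulates maximal runs of non-delimiter characters, lowercasing as it goes.
import Mathlib
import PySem

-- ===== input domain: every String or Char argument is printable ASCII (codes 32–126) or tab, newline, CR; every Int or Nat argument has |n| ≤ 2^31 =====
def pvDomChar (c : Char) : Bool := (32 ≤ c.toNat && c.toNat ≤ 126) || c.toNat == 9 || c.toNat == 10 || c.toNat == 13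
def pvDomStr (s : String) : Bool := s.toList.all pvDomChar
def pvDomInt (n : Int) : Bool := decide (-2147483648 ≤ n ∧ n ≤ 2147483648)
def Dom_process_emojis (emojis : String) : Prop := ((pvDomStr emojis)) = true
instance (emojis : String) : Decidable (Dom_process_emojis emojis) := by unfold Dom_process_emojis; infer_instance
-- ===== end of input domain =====

-- B replaces A's two nested split passes by one character-level scan collecting maximal
-- runs of non-delimiter characters, lowercased on the fly (objective: alternative).

-- ===== PORT A =====
def process_emojis (emojis : String) : List String :=
  if emojis = "" then []
  else
    ((PySem.Str.split? emojis " ").getD []).foldl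
      (fun emojis_list tweet_emoji =>
        ((PySem.Str.split? (PySem.Str.replace (PySem.Str.lower tweet_emoji) ":" "_") "_").getD []).foldl
          (fun acc word => if word ≠ "" then acc ++ [word] else acc)
          emojis_list)
      []

-- ===== PORT B =====
def pvDelim (c : Char) : Bool := c == ' ' || c == ':' || c == '_'

def pvStep (st : List String × List Char) (ch : Char) : List String × List Char :=
  if pvDelim ch then
    if st.2.isEmpty then st else (st.1 ++ [String.ofList st.2], [])
  else (st.1, st.2 ++ [PySem.Chars.lowerChar ch])

def pvFin (st : List String × List Char) : List String :=
  if st.2.isEmpty then st.1 else st.1 ++ [String.ofList st.2]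

def process_emojis_alt (emojis : String) : List String :=
  pvFin (emojis.toList.foldl pvStep ([], []))

-- ===== PRECONDITION & SPEC =====
def Spec_process_emojis (emojis : String) (out : List String) : Prop := out = process_emojis_alt emojis
instance (emojis : String) (out : List String) : Decidable (Spec_process_emojis emojis out) := by unfold Spec_process_emojis; infer_instance

-- ===== CLAIM (what is proved, stated in full; the proofs are below) =====
def Claim_equal_process_emojis : Prop := ∀ (emojis : String), Dom_process_emojis emojis → Spec_process_emojis emojis (process_emojis emojis)

-- ===== LEMMAS AND PROOFS =====

-- helper spec functions (proof-only)
def pvOpt (cur : List Char) : List String := if cur.isEmpty then [] else [String.ofList cur]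

def pvScan (cur : List Char) : List Char → List String
  | [] => pvOpt cur
  | c :: cs => if pvDelim c then pvOpt cur ++ pvScan [] cs else pvScan (cur ++ [PySem.Chars.lowerChar c]) cs

def pvRunOut (cur : List Char) : List Char → List String
  | [] => []
  | c :: cs => if pvDelim c then pvOpt cur ++ pvRunOut [] cs else pvRunOut (cur ++ [PySem.Chars.lowerChar c]) cs

def pvRunSt (cur : List Char) : List Char → List Char
  | [] => cur
  | c :: cs => if pvDelim c then pvRunSt [] cs else pvRunSt (cur ++ [PySem.Chars.lowerChar c]) cs

def pvSplitAux (d : Char) (q : List Char) : List Char → List (List Char)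
  | [] => [q]
  | c :: cs => if c = d then q :: pvSplitAux d [] cs else pvSplitAux d (q ++ [c]) cs

def pvSub (c : Char) : Char := if c = ':' then '_' else c
def pvG (c : Char) : Char := pvSub (PySem.Chars.lowerChar c)

def pvI (t : List Char) : List String :=
  ((pvSplitAux '_' [] (t.map pvG)).map String.ofList).filter (· ≠ "")

-- character facts
theorem pv_lower_lit (c : Char) (d : Char) (hd : d.toNat < 97 ∨ 122 < d.toNat)
    (h : PySem.Chars.lowerChar c = d) : c = d := by
  unfold PySem.Chars.lowerChar at h
  split_ifs at h with hu
  · exfalso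
    have hub : 65 ≤ c.toNat ∧ c.toNat ≤ 90 := by
      simp [PySem.Chars.isupper, Char.le_def] at hu
      exact ⟨hu.1, hu.2⟩
    have : (Char.ofNat (c.toNat + 32)).toNat = c.toNat + 32 := by
      rw [Char.toNat_ofNat, if_pos]
      exact Or.inl (by omega)
    rw [h] at this
    omega
  · exact h

theorem pv_lower_colon (c : Char) (h : PySem.Chars.lowerChar c = ':') : c = ':' :=
  pv_lower_lit c ':' (by decide) h

theorem pv_lower_under (c : Char) (h : PySem.Chars.lowerChar c = '_') : c = '_' :=
  pv_lower_lit c '_' (by decide) h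

theorem pvG_eq_under_iff (c : Char) : pvG c = '_' ↔ (c = ':' ∨ c = '_') := by
  constructor
  · intro h
    unfold pvG pvSub at h
    split_ifs at h with h1
    · exact Or.inl (pv_lower_colon c h1)
    · exact Or.inr (pv_lower_under c h)
  · rintro (rfl | rfl) <;> decide

theorem pvG_eq_lower (c : Char) (h : pvDelim c = false) : pvG c = PySem.Chars.lowerChar c := by
  unfold pvG pvSub
  rw [if_neg]
  intro h1
  have := pv_lower_colon c h1
  subst this
  simp [pvDelim] at h

theorem pvDelim_of_ne_space (c : Char) (h : c ≠ ' ') :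
    pvDelim c = true ↔ (c = ':' ∨ c = '_') := by
  simp [pvDelim, h]

-- splitOn with a one-character separator is pvSplitAux
theorem pv_splitOn_go (d : Char) (fuel : Nat) :
    ∀ (l q : List Char) (hacc : List (List Char)), l.length ≤ fuel →
      PySem.Chars.splitOn.go [d] fuel l q hacc = hacc.reverse ++ pvSplitAux d q.reverse l := by
  induction fuel with
  | zero =>
      intro l q hacc hl
      have : l = [] := List.eq_nil_of_length_eq_zero (Nat.le_zero.mp hl)
      subst this
      simp [PySem.Chars.splitOn.go, pvSplitAux]
  | succ f ih =>
      intro l q hacc hl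
      cases l with
      | nil => simp [PySem.Chars.splitOn.go, pvSplitAux]
      | cons c rest =>
          rw [PySem.Chars.splitOn.go]
          have hpre : List.isPrefixOf [d] (c :: rest) = (d == c) := by
            simp [List.isPrefixOf]
          by_cases hdc : c = d
          · subst hdc
            rw [hpre]
            have hlen : rest.length ≤ f := by
              simp only [List.length_cons] at hl; omega
            simp only [beq_self_eq_true, if_true, List.length_cons, List.length_nil,
              List.drop_succ_cons, List.drop_zero]
            rw [ih rest [] (q.reverse :: hacc) hlen]
            simp [pvSplitAux]
          · rw [hpre]
            have : (d == c) = false := beq_eq_false_iff_ne.mpr fun h => hdc h.symm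
            rw [this]
            simp only [Bool.false_eq_true, if_false]
            have hlen : rest.length ≤ f := by
              simp only [List.length_cons] at hl; omega
            rw [ih rest (c :: q) hacc hlen]
            simp [pvSplitAux, hdc]

theorem pv_splitOn_single (d : Char) (l : List Char) :
    PySem.Chars.splitOn l [d] = pvSplitAux d [] l := by
  unfold PySem.Chars.splitOn
  rw [pv_splitOn_go d (l.length + 1) l [] [] (Nat.le_succ _)]
  simp

-- replace with one-character old/new is a map
theorem pv_replace_go (o n : Char) (fuel : Nat) :
    ∀ (l acc : List Char), l.length ≤ fuel →
      PySem.Chars.replace.go [o] [n] fuel l acc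
        = acc.reverse ++ l.map (fun c => if c = o then n else c) := by
  induction fuel with
  | zero =>
      intro l acc hl
      have : l = [] := List.eq_nil_of_length_eq_zero (Nat.le_zero.mp hl)
      subst this
      simp [PySem.Chars.replace.go]
  | succ f ih =>
      intro l acc hl
      cases l with
      | nil => simp [PySem.Chars.replace.go]
      | cons c rest =>
          rw [PySem.Chars.replace.go]
          have hpre : List.isPrefixOf [o] (c :: rest) = (o == c) := by
            simp [List.isPrefixOf]
          by_cases hco : c = o
          · subst hco
            rw [hpre]
            have hlen : rest.length ≤ f := by
              simp only [List.length_cons] at hl; omega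
            simp only [beq_self_eq_true, if_true, List.length_cons, List.length_nil,
              List.drop_succ_cons, List.drop_zero, List.reverse_cons]
            rw [ih rest ([].reverse ++ [n] ++ acc) hlen]
            simp
          · rw [hpre]
            have : (o == c) = false := beq_eq_false_iff_ne.mpr fun h => hco h.symm
            rw [this]
            simp only [Bool.false_eq_true, if_false]
            have hlen : rest.length ≤ f := by
              simp only [List.length_cons] at hl; omega
            rw [ih rest (c :: acc) hlen]
            simp [hco]

theorem pv_replace_single (o n : Char) (l : List Char) :
    PySem.Chars.replace l [o] [n] = l.map (fun c => if c = o then n else c) := by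
  unfold PySem.Chars.replace
  rw [if_neg (by simp), pv_replace_go o n l.length l [] (le_refl _)]
  simp

-- A's inner processing of one space-free token equals the scan
theorem pv_inner (t : List Char) : ∀ q : List Char, (' ' : Char) ∉ t →
    ((pvSplitAux '_' q (t.map pvG)).map String.ofList).filter (· ≠ "") = pvScan q t := by
  induction t with
  | nil =>
      intro q _
      simp only [List.map_nil, pvSplitAux, List.map_cons, List.map_nil, pvScan, pvOpt]
      by_cases hq : q = []
      · subst hq; simp
      · rw [if_neg (by simpa using hq)]
        simp [String.ofList_eq_empty_iff, hq]
  | cons c cs ih =>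
      intro q hsp
      have hc : c ≠ ' ' := fun h => hsp (h ▸ List.mem_cons_self ..)
      have hcs : (' ' : Char) ∉ cs := fun h => hsp (List.mem_cons_of_mem _ h)
      simp only [List.map_cons, pvSplitAux, pvScan]
      by_cases hdel : pvDelim c = true
      · have hco : c = ':' ∨ c = '_' := (pvDelim_of_ne_space c hc).mp hdel
        have hg : pvG c = '_' := (pvG_eq_under_iff c).mpr hco
        rw [if_pos hg, hdel]
        simp only [if_true, List.map_cons, List.filter_cons]
        rw [ih [] hcs]
        by_cases hq : q = []
        · subst hq; simp [pvOpt]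
        · simp [pvOpt, String.ofList_eq_empty_iff, hq]
      · have hdel' : pvDelim c = false := by simpa using hdel
        have hg : pvG c = PySem.Chars.lowerChar c := pvG_eq_lower c hdel'
        have hgne : pvG c ≠ '_' := by
          intro h
          rcases (pvG_eq_under_iff c).mp h with rfl | rfl <;> simp [pvDelim] at hdel'
        rw [if_neg hgne, hdel']
        simp only [Bool.false_eq_true, if_false]
        rw [hg, ih (q ++ [PySem.Chars.lowerChar c]) hcs]

-- scan over an appended list
theorem pv_scan_append (xs : List Char) : ∀ (cur ys : List Char),
    pvScan cur (xs ++ ys) = pvRunOut cur xs ++ pvScan (pvRunSt cur xs) ys := by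
  induction xs with
  | nil => intro cur ys; simp [pvRunOut, pvRunSt]
  | cons c cs ih =>
      intro cur ys
      simp only [List.cons_append, pvScan, pvRunOut, pvRunSt]
      by_cases h : pvDelim c = true
      · rw [h]; simp only [if_true]
        rw [ih [] ys]
        simp
      · have h' : pvDelim c = false := by simpa using h
        rw [h']
        simp only [Bool.false_eq_true, if_false]
        exact ih _ ys

theorem pv_scan_fin (xs cur : List Char) :
    pvScan cur xs = pvRunOut cur xs ++ pvOpt (pvRunSt cur xs) := by
  have := pv_scan_append xs cur []
  simpa [pvScan] using this

-- A's full token structure equals the scan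
theorem pv_outer (l : List Char) : ∀ p : List Char, (' ' : Char) ∉ p →
    (pvSplitAux ' ' p l).flatMap pvI = pvScan [] (p ++ l) := by
  induction l with
  | nil =>
      intro p hp
      simp only [pvSplitAux, List.flatMap_cons, List.flatMap_nil, List.append_nil]
      rw [pvI, pv_inner p [] hp]
  | cons c cs ih =>
      intro p hp
      by_cases hc : c = ' '
      · subst hc
        rw [show pvSplitAux ' ' p (' ' :: cs) = p :: pvSplitAux ' ' [] cs from by
          simp [pvSplitAux]]
        simp only [List.flatMap_cons]
        rw [ih [] (by simp)]
        rw [pvI, pv_inner p [] hp]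
        rw [pv_scan_append p [] (' ' :: cs)]
        simp only [pvScan, pvDelim]
        rw [pv_scan_fin p []]
        simp
      · rw [show pvSplitAux ' ' p (c :: cs) = pvSplitAux ' ' (p ++ [c]) cs from by
          simp [pvSplitAux, hc]]
        rw [ih (p ++ [c]) (by
          intro h
          rcases List.mem_append.mp h with h1 | h1
          · exact hp h1
          · simp at h1; exact hc h1.symm)]
        simp

-- B's foldl equals the scan
theorem pv_fold_scan (l : List Char) : ∀ (acc : List String) (cur : List Char),
    pvFin (l.foldl pvStep (acc, cur)) = acc ++ pvScan cur l := by
  induction l with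
  | nil =>
      intro acc cur
      simp only [List.foldl_nil, pvScan, pvFin, pvOpt]
      by_cases h : cur.isEmpty <;> simp [h]
  | cons c cs ih =>
      intro acc cur
      simp only [List.foldl_cons, pvScan]
      by_cases h : pvDelim c = true
      · by_cases hcur : cur.isEmpty
        · have hc0 : cur = [] := List.isEmpty_iff.mp hcur
          subst hc0
          rw [show pvStep (acc, []) c = (acc, []) from by simp [pvStep, h]]
          rw [ih acc []]
          simp [pvOpt, h]
        · rw [show pvStep (acc, cur) c = (acc ++ [String.ofList cur], []) from by
            simp [pvStep, h, hcur]]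
          rw [ih (acc ++ [String.ofList cur]) []]
          simp [pvOpt, h, hcur]
      · have h' : pvDelim c = false := eq_false_of_ne_true h
        rw [show pvStep (acc, cur) c = (acc, cur ++ [PySem.Chars.lowerChar c]) from by
          simp [pvStep, h']]
        rw [ih acc (cur ++ [PySem.Chars.lowerChar c])]
        simp [h']

-- ===== VERDICT (by name: the statement is the Claim_ definition above) =====
theorem process_emojis_spec : Claim_equal_process_emojis := by
  intro emojis _
  unfold Spec_process_emojis process_emojis process_emojis_alt
  rw [pv_fold_scan emojis.toList [] []]
  by_cases he : emojis = ""
  · subst he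
    simp [pvScan, pvOpt]
  · rw [if_neg he]
    simp only [PySem.Str.split?, PySem.Chars.split?,
      show (" " : String).toList = [' '] from rfl, show ("_" : String).toList = ['_'] from rfl,
      List.isEmpty_cons, Option.map_some, Option.getD_some, if_false, Bool.false_eq_true]
    have hfun : (fun (acc : List String) (word : String) => if word ≠ "" then acc ++ [word] else acc)
        = (fun acc x => if (!decide (x = "")) = true then acc ++ [id x] else acc) := by
      funext a w
      by_cases hw : w = "" <;> simp [hw]
    have hstep : ∀ (acc : List String) (tweet : String),
        (List.map String.ofList
            (PySem.Chars.splitOn (PySem.Str.replace (PySem.Str.lower tweet) ":" "_").toList ['_'])).foldl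
          (fun acc word => if word ≠ "" then acc ++ [word] else acc) acc
        = acc ++ pvI tweet.toList := by
      intro acc tweet
      have hinner : (PySem.Str.replace (PySem.Str.lower tweet) ":" "_").toList
          = tweet.toList.map pvG := by
        simp only [PySem.Str.replace, PySem.Str.lower, String.toList_ofList,
          show (":" : String).toList = [':'] from rfl, show ("_" : String).toList = ['_'] from rfl]
        rw [pv_replace_single]
        simp only [PySem.Chars.lower, List.map_map]
        rfl
      rw [hinner, pv_splitOn_single '_' (tweet.toList.map pvG), hfun,
        PySem.List.foldl_append_if (fun w : String => !decide (w = "")) id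
          ((pvSplitAux '_' [] (tweet.toList.map pvG)).map String.ofList) acc]
      simp [pvI, ne_eq]
    have hfold : ∀ (pieces : List (List Char)) (acc : List String),
        (pieces.map String.ofList).foldl
          (fun emojis_list tweet_emoji =>
            (List.map String.ofList
                (PySem.Chars.splitOn (PySem.Str.replace (PySem.Str.lower tweet_emoji) ":" "_").toList ['_'])).foldl
              (fun acc word => if word ≠ "" then acc ++ [word] else acc) emojis_list)
          acc
        = acc ++ pieces.flatMap pvI := by
      intro pieces
      induction pieces with
      | nil => intro acc; simp
      | cons t ts ihp =>
          intro acc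
          simp only [List.map_cons, List.foldl_cons, List.flatMap_cons]
          rw [hstep acc (String.ofList t), ihp]
          simp [String.toList_ofList]
    rw [pv_splitOn_single ' ' emojis.toList]
    rw [hfold (pvSplitAux ' ' [] emojis.toList) []]
    rw [pv_outer emojis.toList [] (by simp)]
    simp
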